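-- pv_equiv track=rewrite | github.com/chinmaiks/Face-Classification-using-Neural-Network | data_extraction.py | generate_non_face_image_coordinates
-- ===== SOURCE A (Python) =====
-- def generate_non_face_image_coordinates(face_coordinates, img_width, img_height):
--     w, h = img_width, img_height
--     if img_width < w and img_height < h:
--         return set()
--
--     non_face_coordinates = set()
--
--     for x in range(img_width - 20):
--         for y in range(img_height - 20):
--             lx, ly, rx, ry = x, y, x + w, y + h
--             for llx, lly, rrx, rry in face_coordinates:
--                 if ((rx <= llx) or (ry <= lly) or (lx >= rrx) or (ly >= rry)):
--                     non_face_coordinates.add((lx, ly, rx, ry))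
--                     if len(non_face_coordinates) == len(face_coordinates):
--                         return non_face_coordinates
--     return non_face_coordinates
-- ===== SOURCE B (Python) =====
-- def generate_non_face_image_coordinates(face_coordinates, img_width, img_height):
--     n = len(face_coordinates)
--     result = set()
--     if n == 0:
--         return result
--     max_llx = max(f[0] for f in face_coordinates)
--     max_lly = max(f[1] for f in face_coordinates)
--     min_rrx = min(f[2] for f in face_coordinates)
--     min_rry = min(f[3] for f in face_coordinates)
--     w, h = img_width, img_height
--     for x in range(img_width - 20):
--         for y in range(img_height - 20):
--             if x + w <= max_llx or y + h <= max_lly or x >= min_rrx or y >= min_rry: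
--                 result.add((x, y, x + w, y + h))
--                 if len(result) == n:
--                     return result
--     return result
-- ===== Notes on version B (the rewrite author's own statement) =====
-- stated objective: faster
-- what changed: B precomputes max(llx), max(lly), min(rrx), min(rry) once and tests each grid box against these four extrema in O(1), replacing A's inner loop over all faces for every (x,y) grid position.
import Mathlib
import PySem

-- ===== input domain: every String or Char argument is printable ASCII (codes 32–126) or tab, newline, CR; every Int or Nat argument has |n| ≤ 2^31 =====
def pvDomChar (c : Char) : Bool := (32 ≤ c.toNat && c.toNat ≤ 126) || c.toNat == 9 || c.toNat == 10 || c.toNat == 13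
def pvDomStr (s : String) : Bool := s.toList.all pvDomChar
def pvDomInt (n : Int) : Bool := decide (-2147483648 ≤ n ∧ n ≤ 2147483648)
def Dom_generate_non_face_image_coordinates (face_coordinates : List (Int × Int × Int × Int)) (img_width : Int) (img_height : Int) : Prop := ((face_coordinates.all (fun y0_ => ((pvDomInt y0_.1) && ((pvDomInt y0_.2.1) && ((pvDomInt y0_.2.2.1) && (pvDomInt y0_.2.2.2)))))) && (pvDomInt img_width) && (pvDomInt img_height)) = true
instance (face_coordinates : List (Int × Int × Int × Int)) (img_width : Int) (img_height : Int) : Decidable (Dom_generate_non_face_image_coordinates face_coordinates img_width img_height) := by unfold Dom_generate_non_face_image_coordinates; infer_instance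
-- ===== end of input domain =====

-- B replaces A's inner scan over all faces by four pre-computed extrema (max llx, max lly,
-- min rrx, min rry), giving an O(1) disjointness test per grid box instead of O(F); objective: faster.
-- Both 'for … in range(…)' loops are ported as counting recursion (fuel = number of remaining
-- iterations, exactly Python's lazy range), so the ports are exact including the early 'return'.

-- ===== PORT A =====
-- inner 'for llx, lly, rrx, rry in face_coordinates' loop; Sum.inl = early 'return', Sum.inr = fall through
def pvAFace (F : Nat) (lx ly rx ry : Int) :
    List (Int × Int × Int × Int) → PySem.Set (Int × Int × Int × Int) →
    (PySem.Set (Int × Int × Int × Int)) ⊕ (PySem.Set (Int × Int × Int × Int))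
  | [], s => Sum.inr s
  | (llx, lly, rrx, rry) :: fs, s =>
    if rx ≤ llx ∨ ry ≤ lly ∨ lx ≥ rrx ∨ ly ≥ rry then
      let s' := PySem.Set.add s (lx, ly, rx, ry)
      if s'.length = F then Sum.inl s' else pvAFace F lx ly rx ry fs s'
    else pvAFace F lx ly rx ry fs s

-- 'for y in range(img_height - 20)' loop: fuel n counts the remaining iterations, y is the loop variable
def pvAY (faces : List (Int × Int × Int × Int)) (F : Nat) (w h x : Int) :
    Nat → Int → PySem.Set (Int × Int × Int × Int) →
    (PySem.Set (Int × Int × Int × Int)) ⊕ (PySem.Set (Int × Int × Int × Int))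
  | 0, _, s => Sum.inr s
  | n + 1, y, s =>
    match pvAFace F x y (x + w) (y + h) faces s with
    | Sum.inl s' => Sum.inl s'
    | Sum.inr s' => pvAY faces F w h x n (y + 1) s'

-- 'for x in range(img_width - 20)' loop
def pvAX (faces : List (Int × Int × Int × Int)) (F : Nat) (w h hgt : Int) :
    Nat → Int → PySem.Set (Int × Int × Int × Int) →
    (PySem.Set (Int × Int × Int × Int)) ⊕ (PySem.Set (Int × Int × Int × Int))
  | 0, _, s => Sum.inr s
  | n + 1, x, s =>
    match pvAY faces F w h x (hgt - 20).toNat 0 s with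
    | Sum.inl s' => Sum.inl s'
    | Sum.inr s' => pvAX faces F w h hgt n (x + 1) s'

def generate_non_face_image_coordinates (face_coordinates : List (Int × Int × Int × Int)) (img_width : Int) (img_height : Int) : List (Int × Int × Int × Int) :=
  let w := img_width
  let h := img_height
  if img_width < w ∧ img_height < h then PySem.Set.empty
  else
    match pvAX face_coordinates face_coordinates.length w h img_height
        (img_width - 20).toNat 0 PySem.Set.empty with
    | Sum.inl s => s
    | Sum.inr s => s

-- ===== PORT B =====
-- y loop of B: O(1) test against the four precomputed extrema
def pvBY (n : Nat) (mllx mlly mrrx mrry w h x : Int) :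
    Nat → Int → PySem.Set (Int × Int × Int × Int) →
    (PySem.Set (Int × Int × Int × Int)) ⊕ (PySem.Set (Int × Int × Int × Int))
  | 0, _, s => Sum.inr s
  | k + 1, y, s =>
    if x + w ≤ mllx ∨ y + h ≤ mlly ∨ x ≥ mrrx ∨ y ≥ mrry then
      let s' := PySem.Set.add s (x, y, x + w, y + h)
      if s'.length = n then Sum.inl s'
      else pvBY n mllx mlly mrrx mrry w h x k (y + 1) s'
    else pvBY n mllx mlly mrrx mrry w h x k (y + 1) s

def pvBX (n : Nat) (mllx mlly mrrx mrry w h hgt : Int) :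
    Nat → Int → PySem.Set (Int × Int × Int × Int) →
    (PySem.Set (Int × Int × Int × Int)) ⊕ (PySem.Set (Int × Int × Int × Int))
  | 0, _, s => Sum.inr s
  | k + 1, x, s =>
    match pvBY n mllx mlly mrrx mrry w h x (hgt - 20).toNat 0 s with
    | Sum.inl s' => Sum.inl s'
    | Sum.inr s' => pvBX n mllx mlly mrrx mrry w h hgt k (x + 1) s'

def generate_non_face_image_coordinates_alt (face_coordinates : List (Int × Int × Int × Int)) (img_width : Int) (img_height : Int) : List (Int × Int × Int × Int) :=
  match face_coordinates with
  | [] => PySem.Set.empty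
  | f :: fs =>
    let n := (f :: fs).length
    let mllx := fs.foldl (fun m p => max m p.1) f.1
    let mlly := fs.foldl (fun m p => max m p.2.1) f.2.1
    let mrrx := fs.foldl (fun m p => min m p.2.2.1) f.2.2.1
    let mrry := fs.foldl (fun m p => min m p.2.2.2) f.2.2.2
    match pvBX n mllx mlly mrrx mrry img_width img_height img_height
        (img_width - 20).toNat 0 PySem.Set.empty with
    | Sum.inl s => s
    | Sum.inr s => s

-- ===== PRECONDITION & SPEC =====
def Spec_generate_non_face_image_coordinates (face_coordinates : List (Int × Int × Int × Int)) (img_width : Int) (img_height : Int) (out : List (Int × Int × Int × Int)) : Prop := out = generate_non_face_image_coordinates_alt face_coordinates img_width img_height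
instance (face_coordinates : List (Int × Int × Int × Int)) (img_width : Int) (img_height : Int) (out : List (Int × Int × Int × Int)) : Decidable (Spec_generate_non_face_image_coordinates face_coordinates img_width img_height out) := by unfold Spec_generate_non_face_image_coordinates; infer_instance

-- ===== CLAIM (what is proved, stated in full; the proofs are below) =====
def Claim_equal_generate_non_face_image_coordinates : Prop := ∀ (face_coordinates : List (Int × Int × Int × Int)) (img_width : Int) (img_height : Int), Dom_generate_non_face_image_coordinates face_coordinates img_width img_height → Spec_generate_non_face_image_coordinates face_coordinates img_width img_height (generate_non_face_image_coordinates face_coordinates img_width img_height)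

-- ===== LEMMAS AND PROOFS =====

theorem foldl_max_le_iff (g : (Int × Int × Int × Int) → Int) (r : Int) :
    ∀ (fs : List (Int × Int × Int × Int)) (a : Int),
      r ≤ fs.foldl (fun m p => max m (g p)) a ↔ r ≤ a ∨ ∃ p ∈ fs, r ≤ g p := by
  intro fs
  induction fs with
  | nil => intro a; simp
  | cons p fs ih =>
    intro a
    simp only [List.foldl_cons, ih, le_max_iff, List.exists_mem_cons_iff]
    tauto

theorem foldl_min_le_iff (g : (Int × Int × Int × Int) → Int) (r : Int) :
    ∀ (fs : List (Int × Int × Int × Int)) (a : Int),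
      r ≥ fs.foldl (fun m p => min m (g p)) a ↔ r ≥ a ∨ ∃ p ∈ fs, r ≥ g p := by
  intro fs
  induction fs with
  | nil => intro a; simp
  | cons p fs ih =>
    intro a
    simp only [List.foldl_cons, ih, ge_iff_le, min_le_iff, List.exists_mem_cons_iff]
    tauto

theorem pv_exists_or4 {α : Type} (l : List α) (C1 C2 C3 C4 : α → Prop) :
    (∃ p ∈ l, C1 p ∨ C2 p ∨ C3 p ∨ C4 p) ↔
      ((∃ p ∈ l, C1 p) ∨ (∃ p ∈ l, C2 p) ∨ (∃ p ∈ l, C3 p) ∨ (∃ p ∈ l, C4 p)) := by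
  constructor
  · rintro ⟨p, hp, h | h | h | h⟩
    · exact Or.inl ⟨p, hp, h⟩
    · exact Or.inr (Or.inl ⟨p, hp, h⟩)
    · exact Or.inr (Or.inr (Or.inl ⟨p, hp, h⟩))
    · exact Or.inr (Or.inr (Or.inr ⟨p, hp, h⟩))
  · rintro (⟨p, hp, h⟩ | ⟨p, hp, h⟩ | ⟨p, hp, h⟩ | ⟨p, hp, h⟩)
    · exact ⟨p, hp, Or.inl h⟩
    · exact ⟨p, hp, Or.inr (Or.inl h)⟩
    · exact ⟨p, hp, Or.inr (Or.inr (Or.inl h))⟩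
    · exact ⟨p, hp, Or.inr (Or.inr (Or.inr h))⟩

-- if the box is already in the set and the early-return test failed, the rest of the face loop is a no-op
theorem pvAFace_mem (F : Nat) (lx ly rx ry : Int)
    (fs : List (Int × Int × Int × Int)) (s : PySem.Set (Int × Int × Int × Int))
    (hmem : (lx, ly, rx, ry) ∈ s) (hlen : ¬ s.length = F) :
    pvAFace F lx ly rx ry fs s = Sum.inr s := by
  induction fs with
  | nil => rfl
  | cons p fs ih =>
    obtain ⟨llx, lly, rrx, rry⟩ := p
    have hadd : PySem.Set.add s (lx, ly, rx, ry) = s := PySem.Set.add_of_mem hmem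
    simp only [pvAFace, hadd, if_neg hlen]
    split <;> exact ih

-- A's face loop equals the single existence test
theorem pvAFace_eq (faces : List (Int × Int × Int × Int)) (F : Nat) (lx ly rx ry : Int)
    (s : PySem.Set (Int × Int × Int × Int)) :
    pvAFace F lx ly rx ry faces s =
      (if ∃ p ∈ faces, rx ≤ p.1 ∨ ry ≤ p.2.1 ∨ lx ≥ p.2.2.1 ∨ ly ≥ p.2.2.2 then
        (let s' := PySem.Set.add s (lx, ly, rx, ry)
         if s'.length = F then Sum.inl s' else Sum.inr s')
       else Sum.inr s) := by
  induction faces with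
  | nil => simp [pvAFace]
  | cons p fs ih =>
    obtain ⟨llx, lly, rrx, rry⟩ := p
    by_cases hc : rx ≤ llx ∨ ry ≤ lly ∨ lx ≥ rrx ∨ ly ≥ rry
    · simp only [pvAFace, if_pos hc]
      have hx : ∃ p ∈ (llx, lly, rrx, rry) :: fs,
          rx ≤ p.1 ∨ ry ≤ p.2.1 ∨ lx ≥ p.2.2.1 ∨ ly ≥ p.2.2.2 := ⟨_, List.mem_cons_self, hc⟩
      rw [if_pos hx]
      by_cases hl : (PySem.Set.add s (lx, ly, rx, ry)).length = F
      · simp [hl]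
      · simp only [hl, if_false]
        exact pvAFace_mem F lx ly rx ry fs _ ((PySem.Set.mem_add _ _ _).mpr (Or.inr rfl)) hl
    · simp only [pvAFace, if_neg hc, ih]
      by_cases hx : ∃ p ∈ fs, rx ≤ p.1 ∨ ry ≤ p.2.1 ∨ lx ≥ p.2.2.1 ∨ ly ≥ p.2.2.2
      · obtain ⟨q, hq, hqc⟩ := hx
        rw [if_pos ⟨q, hq, hqc⟩,
          if_pos (show ∃ p ∈ (llx, lly, rrx, rry) :: fs,
            rx ≤ p.1 ∨ ry ≤ p.2.1 ∨ lx ≥ p.2.2.1 ∨ ly ≥ p.2.2.2 from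
            ⟨q, List.mem_cons_of_mem _ hq, hqc⟩)]
      · rw [if_neg hx, if_neg (by
          rintro ⟨q, hq, hqc⟩
          rcases List.mem_cons.mp hq with h | h
          · exact hc (by rw [h] at hqc; exact hqc)
          · exact hx ⟨q, h, hqc⟩)]

-- anything in a state produced (via Sum.inr) by B's y loop was in the input state or has first coordinate x
theorem pvBY_mem (n : Nat) (mllx mlly mrrx mrry w h x : Int) :
    ∀ (k : Nat) (y : Int) (s s' : PySem.Set (Int × Int × Int × Int)),
      pvBY n mllx mlly mrrx mrry w h x k y s = Sum.inr s' →
      ∀ b ∈ s', b ∈ s ∨ b.1 = x := by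
  intro k
  induction k with
  | zero => intro y s s' hs; cases hs; intro b hb; exact Or.inl hb
  | succ k ih =>
    intro y s s' hs b hb
    simp only [pvBY] at hs
    split at hs
    · split at hs
      · cases hs
      · rcases ih _ _ _ hs b hb with h | h
        · rcases (PySem.Set.mem_add _ _ _).mp h with h' | h'
          · exact Or.inl h'
          · right; rw [h']
        · exact Or.inr h
    · exact ih _ _ _ hs b hb

-- the y loops agree when no box of a pending row is in the state yet
theorem pvY_eq (f : Int × Int × Int × Int) (fs : List (Int × Int × Int × Int)) (w h x : Int) :
    ∀ (k : Nat) (y : Int) (s : PySem.Set (Int × Int × Int × Int)),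
      (∀ j : Int, y ≤ j → (x, j, x + w, j + h) ∉ s) →
      pvAY (f :: fs) (f :: fs).length w h x k y s =
        pvBY (f :: fs).length
          (fs.foldl (fun m p => max m p.1) f.1)
          (fs.foldl (fun m p => max m p.2.1) f.2.1)
          (fs.foldl (fun m p => min m p.2.2.1) f.2.2.1)
          (fs.foldl (fun m p => min m p.2.2.2) f.2.2.2) w h x k y s := by
  intro k
  induction k with
  | zero => intro y s _; rfl
  | succ k ih =>
    intro y s hs
    have hbox : (x, y, x + w, y + h) ∉ s := hs y le_rfl
    have hcond : (∃ p ∈ f :: fs, x + w ≤ p.1 ∨ y + h ≤ p.2.1 ∨ x ≥ p.2.2.1 ∨ y ≥ p.2.2.2) ↔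
        (x + w ≤ fs.foldl (fun m p => max m p.1) f.1 ∨
         y + h ≤ fs.foldl (fun m p => max m p.2.1) f.2.1 ∨
         x ≥ fs.foldl (fun m p => min m p.2.2.1) f.2.2.1 ∨
         y ≥ fs.foldl (fun m p => min m p.2.2.2) f.2.2.2) := by
      rw [pv_exists_or4, List.exists_mem_cons_iff, List.exists_mem_cons_iff,
        List.exists_mem_cons_iff, List.exists_mem_cons_iff,
        ← foldl_max_le_iff, ← foldl_max_le_iff, ← foldl_min_le_iff, ← foldl_min_le_iff]
    simp only [pvAY, pvBY, pvAFace_eq (f :: fs) _ x y (x + w) (y + h) s, hcond]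
    by_cases hcnd : (x + w ≤ fs.foldl (fun m p => max m p.1) f.1 ∨
         y + h ≤ fs.foldl (fun m p => max m p.2.1) f.2.1 ∨
         x ≥ fs.foldl (fun m p => min m p.2.2.1) f.2.2.1 ∨
         y ≥ fs.foldl (fun m p => min m p.2.2.2) f.2.2.2)
    · rw [if_pos hcnd, if_pos hcnd]
      by_cases hl : (PySem.Set.add s (x, y, x + w, y + h)).length = (f :: fs).length
      · simp [hl]
      · simp only [hl, if_false]
        refine ih _ _ ?_
        intro j hj
        rw [PySem.Set.mem_add]
        rintro (h' | h')
        · exact hs j (by omega) h'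
        · have : j = y := by
            have := congrArg (fun t => t.2.1) h'
            simpa using this
          omega
    · rw [if_neg hcnd, if_neg hcnd]
      exact ih _ _ (fun j hj => hs j (by omega))

-- the x loops agree when every box in the state has first coordinate below the pending rows
theorem pvX_eq (f : Int × Int × Int × Int) (fs : List (Int × Int × Int × Int)) (w h hgt : Int) :
    ∀ (k : Nat) (x : Int) (s : PySem.Set (Int × Int × Int × Int)),
      (∀ b ∈ s, b.1 < x) →
      pvAX (f :: fs) (f :: fs).length w h hgt k x s =
        pvBX (f :: fs).length
          (fs.foldl (fun m p => max m p.1) f.1)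
          (fs.foldl (fun m p => max m p.2.1) f.2.1)
          (fs.foldl (fun m p => min m p.2.2.1) f.2.2.1)
          (fs.foldl (fun m p => min m p.2.2.2) f.2.2.2) w h hgt k x s := by
  intro k
  induction k with
  | zero => intro x s _; rfl
  | succ k ih =>
    intro x s hs
    have hy := pvY_eq f fs w h x (hgt - 20).toNat 0 s
      (by intro j _ hmem; exact absurd rfl (ne_of_lt (hs _ hmem)))
    simp only [pvAX, pvBX, hy]
    cases hres : pvBY (f :: fs).length
          (fs.foldl (fun m p => max m p.1) f.1)
          (fs.foldl (fun m p => max m p.2.1) f.2.1)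
          (fs.foldl (fun m p => min m p.2.2.1) f.2.2.1)
          (fs.foldl (fun m p => min m p.2.2.2) f.2.2.2) w h x
          (hgt - 20).toNat 0 s with
    | inl s' => rfl
    | inr s' =>
      refine ih _ _ ?_
      intro b hb
      rcases pvBY_mem _ _ _ _ _ _ _ _ _ _ _ _ hres b hb with h' | h'
      · exact lt_trans (hs b h') (by omega)
      · omega

-- with no faces, A's loops never add anything
theorem pvAY_nil (w h x : Int) :
    ∀ (k : Nat) (y : Int) (s : PySem.Set (Int × Int × Int × Int)),
      pvAY [] 0 w h x k y s = Sum.inr s := by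
  intro k
  induction k with
  | zero => intro y s; rfl
  | succ k ih => intro y s; simp only [pvAY, pvAFace]; exact ih _ s

theorem pvAX_nil (w h hgt : Int) :
    ∀ (k : Nat) (x : Int) (s : PySem.Set (Int × Int × Int × Int)),
      pvAX [] 0 w h hgt k x s = Sum.inr s := by
  intro k
  induction k with
  | zero => intro x s; rfl
  | succ k ih => intro x s; simp only [pvAX, pvAY_nil]; exact ih _ s

-- ===== VERDICT (by name: the statement is the Claim_ definition above) =====
theorem generate_non_face_image_coordinates_spec : Claim_equal_generate_non_face_image_coordinates := by
  intro faces W H _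
  show generate_non_face_image_coordinates faces W H = generate_non_face_image_coordinates_alt faces W H
  unfold generate_non_face_image_coordinates generate_non_face_image_coordinates_alt
  simp only [lt_irrefl, false_and, if_false]
  cases faces with
  | nil => simp [pvAX_nil]
  | cons f fs =>
    rw [pvX_eq f fs W H H (W - 20).toNat 0 PySem.Set.empty (by intro b hb; cases hb)]
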